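-- pv_equiv track=rewrite | github.com/EloyTejero/Algo1-IP | p10integradora/ejs.py | un_responsable_por_turno
-- ===== SOURCE A (Python) =====
-- def un_responsable_por_turno(grilla_horaria:list[list[str]]) -> list[tuple[True,True]]:
--     res:list[tuple[bool,bool]] = []
--     for i in range(len(grilla_horaria[0])):
--         primer_encargado_primer_turno:str = grilla_horaria[0][i]
--         primer_turno_igual:bool = True
--         primer_encargado_segundo_turno:str = grilla_horaria[4][i]
--         segundo_turno_igual:bool = True
--         for j in range(len(grilla_horaria)):
--             if j < 4:
--                 if grilla_horaria[j][i] != primer_encargado_primer_turno: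
--                     primer_turno_igual = False
--             else:
--                 if grilla_horaria[j][i] != primer_encargado_segundo_turno:
--                     segundo_turno_igual = False
--         res.append((primer_turno_igual,segundo_turno_igual))
--     return res
-- ===== SOURCE B (Python) =====
-- def un_responsable_por_turno(grilla_horaria: list[list[str]]) -> list[tuple[bool, bool]]:
--     if not grilla_horaria[0]:
--         return []
--     ref1, ref2 = grilla_horaria[0], grilla_horaria[4]
--     t1 = [True] * len(ref1)
--     t2 = [True] * len(ref1)
--     for j, row in enumerate(grilla_horaria):
--         if j < 4:
--             t1 = [row[i] == ref1[i] and t for i, t in enumerate(t1)]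
--         else:
--             t2 = [row[i] == ref2[i] and t for i, t in enumerate(t2)]
--     return list(zip(t1, t2))
-- ===== Notes on version B (the rewrite author's own statement) =====
-- stated objective: alternative
-- what changed: A loops over columns, tracking two boolean flags per column with an inner row loop; B makes one row-outer pass maintaining two whole boolean vectors (elementwise AND of each row against row 0 / row 4) and zips them at the end.
import Mathlib
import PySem

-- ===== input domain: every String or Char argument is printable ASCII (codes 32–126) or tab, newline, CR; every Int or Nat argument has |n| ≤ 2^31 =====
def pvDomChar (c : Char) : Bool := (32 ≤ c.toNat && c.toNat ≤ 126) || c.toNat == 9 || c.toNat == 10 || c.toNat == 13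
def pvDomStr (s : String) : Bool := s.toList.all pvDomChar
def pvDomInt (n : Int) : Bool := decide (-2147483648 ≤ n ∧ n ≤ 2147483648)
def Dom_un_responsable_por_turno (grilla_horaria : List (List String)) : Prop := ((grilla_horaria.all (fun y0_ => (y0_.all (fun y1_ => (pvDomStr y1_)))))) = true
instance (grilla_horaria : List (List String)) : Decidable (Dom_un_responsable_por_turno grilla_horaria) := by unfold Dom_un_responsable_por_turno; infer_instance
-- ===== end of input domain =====

-- B replaces A's column-outer loop with per-column flag pairs by a row-outer pass
-- maintaining two whole boolean vectors (elementwise AND per row), zipped at the end; alternative, same cost.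


-- ===== PORT A =====
-- indexing via getD is exact on Pre_ (all indices in range there)
def un_responsable_por_turno (grilla_horaria : List (List String)) : List (Bool × Bool) :=
  (List.range (grilla_horaria.getD 0 []).length).foldl (fun res i =>
    let primer_encargado_primer_turno := (grilla_horaria.getD 0 []).getD i ""
    let primer_encargado_segundo_turno := (grilla_horaria.getD 4 []).getD i ""
    let st := (List.range grilla_horaria.length).foldl (fun (st : Bool × Bool) j =>
      if j < 4 then
        (if (grilla_horaria.getD j []).getD i "" ≠ primer_encargado_primer_turno then (false, st.2) else st)
      else
        (if (grilla_horaria.getD j []).getD i "" ≠ primer_encargado_segundo_turno then (st.1, false) else st))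
      (true, true)
    res ++ [st]) []

-- ===== PORT B =====
-- enumerate indices are ≥ 0, so .toNat is exact; getD is exact on Pre_ (all indices in range there)
def un_responsable_por_turno_alt (grilla_horaria : List (List String)) : List (Bool × Bool) :=
  if (grilla_horaria.getD 0 []).length = 0 then []
  else
    let ref1 := grilla_horaria.getD 0 []
    let ref2 := grilla_horaria.getD 4 []
    let st := (PySem.List.enumerate grilla_horaria).foldl
      (fun (st : List Bool × List Bool) jr =>
        if jr.1 < 4 then
          ((PySem.List.enumerate st.1).map
            (fun it => (jr.2.getD it.1.toNat "" == ref1.getD it.1.toNat "") && it.2), st.2)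
        else
          (st.1, (PySem.List.enumerate st.2).map
            (fun it => (jr.2.getD it.1.toNat "" == ref2.getD it.1.toNat "") && it.2)))
      (List.replicate ref1.length true, List.replicate ref1.length true)
    st.1.zip st.2

-- ===== PRECONDITION & SPEC =====
-- Pre_ = exactly the inputs on which the Python A returns (on all others it raises IndexError):
-- the grid is nonempty, and either row 0 is empty (the column loop runs zero times),
-- or there are at least 5 rows and every row is at least as long as row 0.
def Pre_un_responsable_por_turno (grilla_horaria : List (List String)) : Prop :=
  grilla_horaria ≠ [] ∧
    ((grilla_horaria.getD 0 []).length = 0 ∨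
      (5 ≤ grilla_horaria.length ∧
        ∀ row ∈ grilla_horaria, (grilla_horaria.getD 0 []).length ≤ row.length))
instance (grilla_horaria : List (List String)) : Decidable (Pre_un_responsable_por_turno grilla_horaria) := by unfold Pre_un_responsable_por_turno; infer_instance

def pvWitness_un_responsable_por_turno : List (List String) :=
  [["a"], ["a"], ["a"], ["a"], ["b"]]

def Spec_un_responsable_por_turno (grilla_horaria : List (List String)) (out : List (Bool × Bool)) : Prop := out = un_responsable_por_turno_alt grilla_horaria
instance (grilla_horaria : List (List String)) (out : List (Bool × Bool)) : Decidable (Spec_un_responsable_por_turno grilla_horaria out) := by unfold Spec_un_responsable_por_turno; infer_instance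

-- ===== CLAIM (what is proved, stated in full; the proofs are below) =====
def Claim_equal_un_responsable_por_turno : Prop := ∀ (grilla_horaria : List (List String)), Dom_un_responsable_por_turno grilla_horaria → Pre_un_responsable_por_turno grilla_horaria → Spec_un_responsable_por_turno grilla_horaria (un_responsable_por_turno grilla_horaria)


-- ===== LEMMAS AND PROOFS =====

-- enumerate as an explicit map over indices
lemma enumerate_eq_map_range {α : Type} (xs : List α) (d : α) (s : Int) :
    PySem.List.enumerate xs s = (List.range xs.length).map (fun k : Nat => ((s + (k : Int), xs.getD k d) : Int × α)) := by
  induction xs generalizing s with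
  | nil => simp [PySem.List.enumerate_nil]
  | cons x xs ih =>
    rw [PySem.List.enumerate_cons, ih (s + 1)]
    simp only [List.length_cons, List.range_succ_eq_map, List.map_cons, List.map_map]
    refine congrArg₂ List.cons (by simp) ?_
    apply List.map_congr_left
    intro k _
    simp only [Function.comp_apply, Nat.succ_eq_add_one, List.getD_cons_succ]
    congr 1
    push_cast
    ring

-- A's inner fold over indices < 4 only updates the first flag
lemma fold_low (cell : Nat → String) (p1 p2 : String) (js : List Nat)
    (h : ∀ j ∈ js, j < 4) (a b : Bool) :
    js.foldl (fun (st : Bool × Bool) j =>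
      if j < 4 then (if cell j ≠ p1 then (false, st.2) else st)
      else (if cell j ≠ p2 then (st.1, false) else st)) (a, b)
      = (a && js.all (fun j => cell j == p1), b) := by
  induction js generalizing a b with
  | nil => simp
  | cons j js ih =>
    have hj := h j (by simp)
    have htail := ih (fun x hx => h x (List.mem_cons_of_mem _ hx))
    rw [List.foldl_cons]
    by_cases hc : cell j = p1
    · rw [if_pos hj, if_neg (by simp [hc] : ¬ cell j ≠ p1), htail a b]
      simp [hc]
    · rw [if_pos hj, if_pos (by simp [hc] : cell j ≠ p1), htail false b]
      simp [hc]

-- A's inner fold over indices ≥ 4 only updates the second flag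
lemma fold_high (cell : Nat → String) (p1 p2 : String) (js : List Nat)
    (h : ∀ j ∈ js, ¬ j < 4) (a b : Bool) :
    js.foldl (fun (st : Bool × Bool) j =>
      if j < 4 then (if cell j ≠ p1 then (false, st.2) else st)
      else (if cell j ≠ p2 then (st.1, false) else st)) (a, b)
      = (a, b && js.all (fun j => cell j == p2)) := by
  induction js generalizing a b with
  | nil => simp
  | cons j js ih =>
    have hj := h j (by simp)
    have htail := ih (fun x hx => h x (List.mem_cons_of_mem _ hx))
    rw [List.foldl_cons]
    by_cases hc : cell j = p2
    · rw [if_neg hj, if_neg (by simp [hc] : ¬ cell j ≠ p2), htail a b]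
      simp [hc]
    · rw [if_neg hj, if_pos (by simp [hc] : cell j ≠ p2), htail a false]
      simp [hc]

-- A as a map over columns
lemma A_char (g : List (List String)) (h5 : 5 ≤ g.length) :
    un_responsable_por_turno g
      = (List.range (g.getD 0 []).length).map (fun i =>
          ((List.range 4).all (fun j => (g.getD j []).getD i "" == (g.getD 0 []).getD i ""),
           (List.range' 4 (g.length - 4)).all (fun j => (g.getD j []).getD i "" == (g.getD 4 []).getD i ""))) := by
  unfold un_responsable_por_turno
  rw [PySem.List.foldl_append_singleton_eq_map, List.nil_append]
  apply List.map_congr_left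
  intro i _
  have hsplit : List.range g.length = List.range 4 ++ List.range' 4 (g.length - 4) := by
    rw [List.range'_eq_map_range]
    conv_lhs => rw [show g.length = 4 + (g.length - 4) by omega]
    rw [List.range_add]
  rw [hsplit, List.foldl_append]
  rw [fold_low (fun j => (g.getD j []).getD i "") _ _ _ (by intro j hj; simpa using hj) true true]
  rw [fold_high (fun j => (g.getD j []).getD i "") _ _ _
    (by intro j hj; rw [List.mem_range'] at hj; omega)]
  simp

-- one elementwise-AND step of B on a vector given as a map over column indices
lemma inner_map (row r : List String) (b : Nat → Bool) (n : Nat) :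
    (PySem.List.enumerate ((List.range n).map b)).map
        (fun it => (row.getD it.1.toNat "" == r.getD it.1.toNat "") && it.2)
      = (List.range n).map (fun i => (row.getD i "" == r.getD i "") && b i) := by
  rw [enumerate_eq_map_range _ false 0]
  simp only [List.map_map, List.length_map, List.length_range]
  apply List.map_congr_left
  intro k hk
  rw [List.mem_range] at hk
  simp [List.getD_eq_getElem?_getD, List.getElem?_map, hk]

-- B's one-sided fold over a list of rows, accumulated into the map form
lemma fold_rows (rows : List (List String)) (r : List String) (b : Nat → Bool) (n : Nat) :
    rows.foldl (fun t row =>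
        (PySem.List.enumerate t).map
          (fun it => (row.getD it.1.toNat "" == r.getD it.1.toNat "") && it.2))
      ((List.range n).map b)
      = (List.range n).map (fun i => b i && rows.all (fun row => row.getD i "" == r.getD i "")) := by
  induction rows generalizing b with
  | nil => simp
  | cons row rows ih =>
    rw [List.foldl_cons, inner_map, ih]
    apply List.map_congr_left
    intro i _
    simp only [List.all_cons]
    cases b i <;> cases (row.getD i "" == r.getD i "") <;> simp

-- B's paired fold over rows whose indices are all < 4 only touches the first vector
lemma pair_fold_low (r1 r4 : List String) (ps : List (Int × List String))
    (h : ∀ p ∈ ps, p.1 < 4) (t1 t2 : List Bool) :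
    ps.foldl (fun (st : List Bool × List Bool) jr =>
      if jr.1 < 4 then
        ((PySem.List.enumerate st.1).map
          (fun it => (jr.2.getD it.1.toNat "" == r1.getD it.1.toNat "") && it.2), st.2)
      else
        (st.1, (PySem.List.enumerate st.2).map
          (fun it => (jr.2.getD it.1.toNat "" == r4.getD it.1.toNat "") && it.2))) (t1, t2)
      = ((ps.map Prod.snd).foldl (fun t row =>
          (PySem.List.enumerate t).map
            (fun it => (row.getD it.1.toNat "" == r1.getD it.1.toNat "") && it.2)) t1, t2) := by
  induction ps generalizing t1 with
  | nil => simp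
  | cons p ps ih =>
    rw [List.foldl_cons, if_pos (h p (by simp)), List.map_cons, List.foldl_cons]
    exact ih (fun q hq => h q (List.mem_cons_of_mem _ hq)) _

-- B's paired fold over rows whose indices are all ≥ 4 only touches the second vector
lemma pair_fold_high (r1 r4 : List String) (ps : List (Int × List String))
    (h : ∀ p ∈ ps, ¬ p.1 < 4) (t1 t2 : List Bool) :
    ps.foldl (fun (st : List Bool × List Bool) jr =>
      if jr.1 < 4 then
        ((PySem.List.enumerate st.1).map
          (fun it => (jr.2.getD it.1.toNat "" == r1.getD it.1.toNat "") && it.2), st.2)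
      else
        (st.1, (PySem.List.enumerate st.2).map
          (fun it => (jr.2.getD it.1.toNat "" == r4.getD it.1.toNat "") && it.2))) (t1, t2)
      = (t1, (ps.map Prod.snd).foldl (fun t row =>
          (PySem.List.enumerate t).map
            (fun it => (row.getD it.1.toNat "" == r4.getD it.1.toNat "") && it.2)) t2) := by
  induction ps generalizing t2 with
  | nil => simp
  | cons p ps ih =>
    rw [List.foldl_cons, if_neg (h p (by simp)), List.map_cons, List.foldl_cons]
    exact ih (fun q hq => h q (List.mem_cons_of_mem _ hq)) _

-- a prefix/suffix of the grid as a map over row indices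
lemma take_eq_map_range (g : List (List String)) (m : Nat) (h : m ≤ g.length) :
    g.take m = (List.range m).map (fun j => g.getD j []) := by
  apply List.ext_getElem
  · simp [h]
  · intro k h1 h2
    simp at h1
    simp [List.getD_eq_getElem?_getD, h1]

lemma drop_eq_map_range (g : List (List String)) (m : Nat) (h : m ≤ g.length) :
    g.drop m = (List.range (g.length - m)).map (fun k => g.getD (m + k) []) := by
  apply List.ext_getElem
  · simp
  · intro k h1 h2
    simp at h1
    simp [List.getD_eq_getElem?_getD, (by omega : m + k < g.length)]

-- the ports agree whenever the grid has at least 5 rows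
lemma ports_agree_of_five (g : List (List String)) (h5 : 5 ≤ g.length) :
    un_responsable_por_turno g = un_responsable_por_turno_alt g := by
  rw [A_char g h5]
  unfold un_responsable_por_turno_alt
  by_cases hn0 : (g.getD 0 []).length = 0
  · rw [if_pos hn0, hn0]
    simp
  rw [if_neg hn0]
  simp only []
  set n := (g.getD 0 []).length with hn
  have hlen4 : (g.take 4).length = 4 := by simp; omega
  have henum : PySem.List.enumerate g = PySem.List.enumerate (g.take 4) ++ PySem.List.enumerate (g.drop 4) (0 + ((g.take 4).length : Int)) := by
    conv_lhs => rw [show g = g.take 4 ++ g.drop 4 from (List.take_append_drop 4 g).symm]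
    rw [PySem.List.enumerate_append]
  rw [henum, hlen4]
  rw [List.foldl_append]
  rw [show (List.replicate n true, List.replicate n true)
        = ((List.range n).map (fun _ => true), (List.range n).map (fun _ => true)) by simp]
  rw [pair_fold_low (g.getD 0 []) (g.getD 4 []) (PySem.List.enumerate (g.take 4)) (by
    intro p hp
    rw [PySem.List.mem_enumerate_iff] at hp
    obtain ⟨k, hk, rfl⟩ := hp
    rw [List.length_take] at hk
    simp only []
    omega)]
  rw [pair_fold_high (g.getD 0 []) (g.getD 4 []) (PySem.List.enumerate (g.drop 4) (0 + ((4:Nat):Int))) (by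
    intro p hp
    rw [PySem.List.mem_enumerate_iff] at hp
    obtain ⟨k, hk, rfl⟩ := hp
    simp only []
    push_cast
    omega)]
  rw [PySem.List.map_snd_enumerate, PySem.List.map_snd_enumerate]
  rw [fold_rows, fold_rows]
  rw [List.zip_map']
  apply List.map_congr_left
  intro i _
  rw [take_eq_map_range g 4 (by omega), drop_eq_map_range g 4 (by omega)]
  rw [List.all_map, List.all_map]
  rw [List.range'_eq_map_range, List.all_map]
  simp [Function.comp_def]

-- ===== VERDICT (by name: the statement is the Claim_ definition above) =====
theorem un_responsable_por_turno_spec : Claim_equal_un_responsable_por_turno := by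
  intro g _ hpre
  unfold Spec_un_responsable_por_turno
  obtain ⟨hne, hcase⟩ := hpre
  rcases hcase with h0 | ⟨h5, _⟩
  · unfold un_responsable_por_turno un_responsable_por_turno_alt
    rw [h0]
    simp
  · exact ports_agree_of_five g h5
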